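-- pv_equiv track=rewrite | github.com/shivam21nit-bit/MSSQL-MCP-FASTMCP | main.py | _split_set_list
-- ===== SOURCE A (Python) =====
-- from typing import Dict, Optional, Tuple, List, Any
--
-- def _normalize_brackets(s: str) -> str:
--     return s.replace("[", "").replace("]", "").strip()
--
-- def _split_csv(expr: str) -> List[str]:
--     parts, buf, depth = [], "", 0
--     for ch in expr:
--         if ch == "(":
--             depth += 1
--         elif ch == ")":
--             depth = max(0, depth - 1)
--         if ch == "," and depth == 0:
--             parts.append(buf.strip()); buf = ""
--         else:
--             buf += ch
--     if buf.strip():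
--         parts.append(buf.strip())
--     return parts
--
-- def _split_set_list(sets: str) -> List[Tuple[str, str]]:
--     parts = _split_csv(sets)
--     out: List[Tuple[str, str]] = []
--     for p in parts:
--         depth = 0; eq_idx = -1
--         for i,ch in enumerate(p):
--             if ch == '(':
--                 depth += 1
--             elif ch == ')':
--                 depth = max(0, depth-1)
--             elif ch == '=' and depth == 0:
--                 eq_idx = i; break
--         if eq_idx > 0:
--             col = _normalize_brackets(p[:eq_idx].strip())
--             expr = p[eq_idx+1:].strip()
--             out.append((col, expr))
--     return out
-- ===== SOURCE B (Python) =====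
-- def _normalize_brackets(s: str) -> str:
--     return s.replace("[", "").replace("]", "").strip()
--
-- def _split_set_list(sets):
--     out = []
--     col, expr, depth, eq_seen = "", "", 0, False
--
--     def finalize():
--         if eq_seen and col.strip():
--             out.append((_normalize_brackets(col.strip()), expr.strip()))
--
--     for ch in sets:
--         if ch == "(":
--             depth += 1
--         elif ch == ")":
--             depth = max(0, depth - 1)
--         if ch == "," and depth == 0:
--             finalize()
--             col, expr, eq_seen = "", "", False
--         elif ch == "=" and depth == 0 and not eq_seen:
--             eq_seen = True
--         elif eq_seen:
--             expr += ch
--         else: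
--             col += ch
--     finalize()
--     return out
-- ===== Notes on version B (the rewrite author's own statement) =====
-- stated objective: simpler
-- what changed: A comma-splits the whole string in one pass and then re-scans every part (re-tracking paren depth from scratch) to locate its first top-level equals sign; B is a single character-by-character scan of the whole string with one depth counter, a column buffer, an expression buffer and an eq-seen flag, finalizing a pair at each top-level comma and at the end.
import Mathlib
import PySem

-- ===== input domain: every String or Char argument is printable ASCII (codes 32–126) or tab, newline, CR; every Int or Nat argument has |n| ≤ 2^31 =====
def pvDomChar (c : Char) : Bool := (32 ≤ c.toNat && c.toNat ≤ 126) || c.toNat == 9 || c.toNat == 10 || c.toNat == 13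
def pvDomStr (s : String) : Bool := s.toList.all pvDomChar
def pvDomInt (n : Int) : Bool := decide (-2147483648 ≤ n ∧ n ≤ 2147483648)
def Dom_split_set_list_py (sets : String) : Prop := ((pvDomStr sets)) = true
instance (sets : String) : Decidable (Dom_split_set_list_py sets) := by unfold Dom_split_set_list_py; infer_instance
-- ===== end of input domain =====

-- B replaces A's two passes (comma-split the whole string, then re-scan each part for its '=')
-- by ONE character scan maintaining column/expression buffers; objective: simpler single-pass decomposition.

-- ===== PORT A =====
-- _normalize_brackets: s.replace("[","").replace("]","").strip()  (shared by both Pythons verbatim)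
def normBrackets (s : List Char) : List Char :=
  PySem.Chars.strip (PySem.Chars.replace (PySem.Chars.replace s ['['] []) [']'] [])

-- _split_csv's loop over the characters: state (parts, buf, depth)
def splitCsvGo : List Char → List (List Char) → List Char → Int → List (List Char)
  | [], parts, buf, _ =>
      if (PySem.Chars.strip buf).isEmpty then parts else parts ++ [PySem.Chars.strip buf]
  | ch :: rest, parts, buf, depth =>
      let depth := if ch = '(' then depth + 1 else if ch = ')' then max 0 (depth - 1) else depth
      if ch = ',' ∧ depth = 0 then
        splitCsvGo rest (parts ++ [PySem.Chars.strip buf]) [] depth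
      else
        splitCsvGo rest parts (buf ++ [ch]) depth

-- the inner 'for i, ch in enumerate(p)' loop with break: returns eq_idx
def findEqGo : List Char → Int → Int → Int
  | [], _, _ => -1
  | ch :: rest, i, depth =>
      if ch = '(' then findEqGo rest (i + 1) (depth + 1)
      else if ch = ')' then findEqGo rest (i + 1) (max 0 (depth - 1))
      else if ch = '=' ∧ depth = 0 then i
      else findEqGo rest (i + 1) depth

-- the 'for p in parts' loop building out
def partsLoop : List (List Char) → List (String × String) → List (String × String)
  | [], out => out
  | p :: rest, out =>
      let eqIdx := findEqGo p 0 0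
      if eqIdx > 0 then
        partsLoop rest (out ++
          [(String.ofList (normBrackets (PySem.Chars.strip (PySem.List.slice p none (some eqIdx)))),
            String.ofList (PySem.Chars.strip (PySem.List.slice p (some (eqIdx + 1)) none)))])
      else partsLoop rest out

def split_set_list_py (sets : String) : List (String × String) :=
  partsLoop (splitCsvGo sets.toList [] [] 0) []

-- ===== PORT B =====
-- finalize(): append the pending pair if an '=' was seen and the column is non-blank
def finB (col expr : List Char) (eqSeen : Bool) : List (String × String) :=
  if eqSeen = true ∧ PySem.Chars.strip col ≠ [] then
    [(String.ofList (normBrackets (PySem.Chars.strip col)), String.ofList (PySem.Chars.strip expr))]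
  else []

-- the single scan: state (out, col, expr, depth, eq_seen)
def goB : List Char → List (String × String) → List Char → List Char → Int → Bool → List (String × String)
  | [], out, col, expr, _, eqSeen => out ++ finB col expr eqSeen
  | ch :: rest, out, col, expr, depth, eqSeen =>
      let depth := if ch = '(' then depth + 1 else if ch = ')' then max 0 (depth - 1) else depth
      if ch = ',' ∧ depth = 0 then
        goB rest (out ++ finB col expr eqSeen) [] [] depth false
      else if ch = '=' ∧ depth = 0 ∧ eqSeen = false then
        goB rest out col expr depth true
      else if eqSeen then
        goB rest out col (expr ++ [ch]) depth eqSeen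
      else
        goB rest out (col ++ [ch]) expr depth eqSeen

def split_set_list_py_alt (sets : String) : List (String × String) :=
  goB sets.toList [] [] [] 0 false

-- ===== PRECONDITION & SPEC =====
def Spec_split_set_list_py (sets : String) (out : List (String × String)) : Prop := out = split_set_list_py_alt sets
instance (sets : String) (out : List (String × String)) : Decidable (Spec_split_set_list_py sets out) := by unfold Spec_split_set_list_py; infer_instance

-- ===== CLAIM (what is proved, stated in full; the proofs are below) =====
def Claim_equal_split_set_list_py : Prop := ∀ (sets : String), Dom_split_set_list_py sets → Spec_split_set_list_py sets (split_set_list_py sets)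

-- ===== LEMMAS AND PROOFS =====

-- the common depth update of both programs
def depthStep (d : Int) (ch : Char) : Int :=
  if ch = '(' then d + 1 else if ch = ')' then max 0 (d - 1) else d

-- first top-level '=' split: some (before, after) if a depth-0 '=' occurs, scanning from depth d
def fes : List Char → Int → Option (List Char × List Char)
  | [], _ => none
  | ch :: rest, d =>
      if ch = '=' ∧ d = 0 then some ([], rest)
      else match fes rest (depthStep d ch) with
           | some (c, e) => some (ch :: c, e)
           | none => none

-- one step of B's in-part state transition (comma treated as an ordinary character)
def scanStep : List Char × List Char × Bool × Int → Char → List Char × List Char × Bool × Int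
  | (col, expr, eqSeen, d), ch =>
      let d' := depthStep d ch
      if ch = '=' ∧ d' = 0 ∧ eqSeen = false then (col, expr, true, d')
      else if eqSeen then (col, expr ++ [ch], eqSeen, d')
      else (col ++ [ch], expr, eqSeen, d')

-- what A contributes to the output for one (already stripped) part
def partContrib (p : List Char) : List (String × String) :=
  let eqIdx := findEqGo p 0 0
  if eqIdx > 0 then
    [(String.ofList (normBrackets (PySem.Chars.strip (PySem.List.slice p none (some eqIdx)))),
      String.ofList (PySem.Chars.strip (PySem.List.slice p (some (eqIdx + 1)) none)))]
  else []

lemma ws_ne (ch : Char) (h : PySem.Chars.isspace ch = true) :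
    ch ≠ '=' ∧ ch ≠ '(' ∧ ch ≠ ')' := by
  refine ⟨?_, ?_, ?_⟩ <;> (rintro rfl; exact absurd h (by decide))

lemma depthStep_ws (d : Int) (ch : Char) (h : PySem.Chars.isspace ch = true) :
    depthStep d ch = d := by
  obtain ⟨_, h2, h3⟩ := ws_ne ch h
  simp [depthStep, h2, h3]

lemma fes_no_eq (l : List Char) (hl : ∀ c ∈ l, c ≠ '=') (d : Int) : fes l d = none := by
  induction l generalizing d with
  | nil => rfl
  | cons ch rest ih =>
    have h1 : ch ≠ '=' := hl ch (by simp)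
    simp [fes, h1, ih (fun c hc => hl c (by simp [hc]))]

lemma fes_ws_prefix (w : List Char) (hw : ∀ c ∈ w, PySem.Chars.isspace c = true)
    (s : List Char) (d : Int) :
    fes (w ++ s) d = (fes s d).map (fun p => (w ++ p.1, p.2)) := by
  induction w with
  | nil => cases h : fes s d <;> simp [h]
  | cons ch rest ih =>
    have hch := hw ch (by simp)
    obtain ⟨h1, _, _⟩ := ws_ne ch hch
    have ih' := ih (fun c hc => hw c (by simp [hc]))
    simp only [List.cons_append, fes, h1, false_and, if_false, depthStep_ws d ch hch, ih']
    cases fes s d <;> simp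

lemma fes_ws_suffix (w : List Char) (hw : ∀ c ∈ w, PySem.Chars.isspace c = true)
    (s : List Char) (d : Int) :
    fes (s ++ w) d = (fes s d).map (fun p => (p.1, p.2 ++ w)) := by
  induction s generalizing d with
  | nil =>
    simp [fes, fes_no_eq w (fun c hc => (ws_ne c (hw c hc)).1) d]
  | cons ch rest ih =>
    by_cases h : ch = '=' ∧ d = 0
    · simp [fes, h]
    · simp only [List.cons_append, fes, h, if_false, ih (depthStep d ch)]
      cases fes rest (depthStep d ch) <;> simp

lemma fes_decomp (p : List Char) (d : Int) (c e : List Char) (h : fes p d = some (c, e)) :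
    p = c ++ '=' :: e := by
  induction p generalizing d c e with
  | nil => simp [fes] at h
  | cons ch rest ih =>
    by_cases h1 : ch = '=' ∧ d = 0
    · simp only [fes, h1] at h
      obtain ⟨rfl, rfl⟩ := h
      simp [h1.1]
    · simp only [fes, h1, if_false] at h
      cases h2 : fes rest (depthStep d ch) with
      | none => simp [h2] at h
      | some ce =>
        obtain ⟨c', e'⟩ := ce
        simp only [h2, Option.some.injEq, Prod.mk.injEq] at h
        obtain ⟨rfl, rfl⟩ := h
        simp [ih (depthStep d ch) c' e' h2]

lemma findEqGo_fes (p : List Char) : ∀ (i d : Int),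
    findEqGo p i d = (match fes p d with
                      | some (c, _) => i + (c.length : Int)
                      | none => -1) := by
  induction p with
  | nil => intro i d; rfl
  | cons ch rest ih =>
    intro i d
    by_cases h3 : ch = '=' ∧ d = 0
    · obtain ⟨rfl, rfl⟩ := h3
      simp [findEqGo, fes]
    · have hgo : findEqGo (ch :: rest) i d = findEqGo rest (i + 1) (depthStep d ch) := by
        by_cases c1 : ch = '('
        · simp [findEqGo, c1, depthStep]
        · by_cases c2 : ch = ')'
          · simp [findEqGo, c2, depthStep]
          · simp [findEqGo, c1, c2, h3, depthStep]
      rw [hgo, ih]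
      simp only [fes, h3, if_false]
      cases h : fes rest (depthStep d ch) with
      | none => simp
      | some ce =>
        obtain ⟨c, e⟩ := ce
        simp only [List.length_cons]
        push_cast
        ring

lemma scan_absorb (buf : List Char) : ∀ (col0 expr0 : List Char) (d0 : Int),
    buf.foldl scanStep (col0, expr0, true, d0) =
      (col0, expr0 ++ buf, true, buf.foldl depthStep d0) := by
  induction buf with
  | nil => intro col0 expr0 d0; simp
  | cons ch rest ih =>
    intro col0 expr0 d0
    have : scanStep (col0, expr0, true, d0) ch = (col0, expr0 ++ [ch], true, depthStep d0 ch) := by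
      simp [scanStep]
    simp [this, ih]

lemma scan_char (buf : List Char) : ∀ (col0 : List Char) (d0 : Int),
    buf.foldl scanStep (col0, [], false, d0) =
      (match fes buf d0 with
       | none => (col0 ++ buf, [], false, buf.foldl depthStep d0)
       | some (c, e) => (col0 ++ c, e, true, buf.foldl depthStep d0)) := by
  induction buf with
  | nil => intro col0 d0; simp [fes]
  | cons ch rest ih =>
    intro col0 d0
    by_cases h1 : ch = '=' ∧ (depthStep d0 ch) = 0
    · obtain ⟨rfl, h10⟩ := h1
      have hd : depthStep d0 '=' = d0 := by simp [depthStep]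
      rw [hd] at h10
      subst h10
      have hstep : scanStep (col0, [], false, 0) '=' = (col0, [], true, 0) := by
        simp [scanStep, depthStep]
      rw [List.foldl_cons, hstep, scan_absorb]
      simp [fes, depthStep]
    · have h1'' : ¬ (ch = '=' ∧ d0 = 0) := by
        intro ⟨ha, hb⟩; exact h1 ⟨ha, by subst ha hb; simp [depthStep]⟩
      have : scanStep (col0, [], false, d0) ch = (col0 ++ [ch], [], false, depthStep d0 ch) := by
        simp only [scanStep]
        rw [if_neg (by simpa using h1)]
        simp
      simp only [List.foldl_cons, this, ih, fes, h1'', if_false]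
      cases h : fes rest (depthStep d0 ch) with
      | none => simp
      | some ce => cases ce; simp

lemma strip_eq_nil_of_ws (w : List Char) (hw : ∀ c ∈ w, PySem.Chars.isspace c = true) :
    PySem.Chars.strip w = [] := by
  have h1 : PySem.Chars.lstrip w = [] := by
    simp [PySem.Chars.lstrip, List.dropWhile_eq_nil_iff]
    exact hw
  simp [PySem.Chars.strip, h1, PySem.Chars.rstrip]

lemma strip_ws_prefix (w : List Char) (hw : ∀ c ∈ w, PySem.Chars.isspace c = true)
    (s : List Char) : PySem.Chars.strip (w ++ s) = PySem.Chars.strip s := by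
  have : PySem.Chars.lstrip (w ++ s) = PySem.Chars.lstrip s := by
    simp only [PySem.Chars.lstrip, List.dropWhile_append]
    have : List.dropWhile PySem.Chars.isspace w = [] := by
      simp [List.dropWhile_eq_nil_iff]; exact hw
    simp [this]
  simp [PySem.Chars.strip, this]

lemma rstrip_ws_suffix (w : List Char) (hw : ∀ c ∈ w, PySem.Chars.isspace c = true)
    (s : List Char) : PySem.Chars.rstrip (s ++ w) = PySem.Chars.rstrip s := by
  simp only [PySem.Chars.rstrip, List.reverse_append, List.dropWhile_append]
  have : List.dropWhile PySem.Chars.isspace w.reverse = [] := by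
    simp [List.dropWhile_eq_nil_iff]; intro c hc; exact hw c (by simpa using hc)
  simp [this]

lemma strip_ws_suffix (w : List Char) (hw : ∀ c ∈ w, PySem.Chars.isspace c = true)
    (s : List Char) : PySem.Chars.strip (s ++ w) = PySem.Chars.strip s := by
  by_cases h : PySem.Chars.lstrip s = []
  · have hs : ∀ c ∈ s, PySem.Chars.isspace c = true := by
      simpa [PySem.Chars.lstrip, List.dropWhile_eq_nil_iff] using h
    rw [strip_eq_nil_of_ws s hs, strip_eq_nil_of_ws (s ++ w)
      (by intro c hc; rcases List.mem_append.1 hc with h' | h'; exacts [hs c h', hw c h'])]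
  · have : PySem.Chars.lstrip (s ++ w) = PySem.Chars.lstrip s ++ w := by
      simp only [PySem.Chars.lstrip, List.dropWhile_append]
      simp [PySem.Chars.lstrip] at h
      simp [h]
    simp [PySem.Chars.strip, this, rstrip_ws_suffix w hw]

-- buf = (leading ws) ++ strip buf ++ (trailing ws)
lemma strip_decomp (buf : List Char) :
    ∃ w1 w2, (∀ c ∈ w1, PySem.Chars.isspace c = true) ∧ (∀ c ∈ w2, PySem.Chars.isspace c = true) ∧
      buf = w1 ++ PySem.Chars.strip buf ++ w2 := by
  refine ⟨List.takeWhile PySem.Chars.isspace buf,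
          (List.takeWhile PySem.Chars.isspace (PySem.Chars.lstrip buf).reverse).reverse,
          fun c hc => List.mem_takeWhile_imp hc, ?_, ?_⟩
  · intro c hc
    exact List.mem_takeWhile_imp (List.mem_reverse.1 hc)
  · have h2 : PySem.Chars.lstrip buf =
        PySem.Chars.strip buf ++ (List.takeWhile PySem.Chars.isspace (PySem.Chars.lstrip buf).reverse).reverse := by
      have h3 := List.takeWhile_append_dropWhile (p := PySem.Chars.isspace)
        (l := (PySem.Chars.lstrip buf).reverse)
      calc PySem.Chars.lstrip buf = ((PySem.Chars.lstrip buf).reverse).reverse := by simp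
        _ = (List.takeWhile PySem.Chars.isspace (PySem.Chars.lstrip buf).reverse ++
              List.dropWhile PySem.Chars.isspace (PySem.Chars.lstrip buf).reverse).reverse := by rw [h3]
        _ = _ := by
              rw [List.reverse_append]
              rfl
    conv_lhs => rw [← List.takeWhile_append_dropWhile (p := PySem.Chars.isspace) (l := buf),
      show List.dropWhile PySem.Chars.isspace buf = PySem.Chars.lstrip buf from rfl, h2]
    simp

lemma head_strip_not_space (s : List Char) (a : Char) (t : List Char)
    (h : PySem.Chars.strip s = a :: t) : PySem.Chars.isspace a = false := by
  have hpre : PySem.Chars.strip s <+: PySem.Chars.lstrip s := by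
    have h0 : (PySem.Chars.lstrip s).reverse.dropWhile PySem.Chars.isspace <:+ (PySem.Chars.lstrip s).reverse :=
      List.dropWhile_suffix _
    simpa [PySem.Chars.strip, PySem.Chars.rstrip] using List.IsSuffix.reverse h0
  obtain ⟨rest, hrest⟩ := hpre
  rw [h] at hrest
  have : PySem.Chars.lstrip s = a :: (t ++ rest) := by simpa using hrest.symm
  have hd : List.dropWhile PySem.Chars.isspace s = a :: (t ++ rest) := this
  by_contra hws
  simp only [Bool.not_eq_false] at hws
  have := List.head?_dropWhile_not PySem.Chars.isspace s
  rw [hd] at this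
  simp [hws] at this

-- the key lemma: B's finalize of its scanned state = A's contribution for the stripped buffer
lemma finB_eq (buf col expr : List Char) (eq : Bool) (d : Int)
    (h : buf.foldl scanStep ([], [], false, 0) = (col, expr, eq, d)) :
    finB col expr eq = partContrib (PySem.Chars.strip buf) := by
  obtain ⟨w1, w2, hw1, hw2, hdec⟩ := strip_decomp buf
  have hfes : fes buf 0 =
      ((fes (PySem.Chars.strip buf) 0).map (fun p => (p.1, p.2 ++ w2))).map
        (fun p => (w1 ++ p.1, p.2)) := by
    conv_lhs => rw [hdec, List.append_assoc]
    rw [fes_ws_prefix w1 hw1, fes_ws_suffix w2 hw2]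
  rw [scan_char] at h
  cases hf : fes (PySem.Chars.strip buf) 0 with
  | none =>
    rw [hfes, hf] at h
    simp only [Option.map_none] at h
    have heq : eq = false := by
      have := congrArg (fun x => x.2.2.1) h; simpa using this.symm
    have hfind := findEqGo_fes (PySem.Chars.strip buf) 0 0
    rw [hf] at hfind
    simp [finB, heq, partContrib, hfind]
  | some ce =>
    obtain ⟨c, e⟩ := ce
    rw [hfes, hf] at h
    simp only [Option.map_some] at h
    have hcol : col = w1 ++ c := by
      have := congrArg (fun x => x.1) h; simpa using this.symm
    have hexpr : expr = e ++ w2 := by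
      have := congrArg (fun x => x.2.1) h; simpa using this.symm
    have heq : eq = true := by
      have := congrArg (fun x => x.2.2.1) h; simpa using this.symm
    have hfind := findEqGo_fes (PySem.Chars.strip buf) 0 0
    rw [hf] at hfind
    simp only [zero_add] at hfind
    have hsplit : PySem.Chars.strip buf = c ++ '=' :: e := fes_decomp _ _ _ _ hf
    cases c with
    | nil =>
      have hcolnil : PySem.Chars.strip col = [] := by
        rw [hcol]; simpa using strip_eq_nil_of_ws w1 hw1
      simp [finB, hcolnil, partContrib, hfind]
    | cons a t =>
      have hstripc : PySem.Chars.strip col = PySem.Chars.strip (a :: t) := by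
        rw [hcol]; exact strip_ws_prefix w1 hw1 _
      have haws : PySem.Chars.isspace a = false :=
        head_strip_not_space buf a (t ++ '=' :: e) (by simpa using hsplit)
      have hlst : PySem.Chars.lstrip (a :: t) = a :: t := by
        simp [PySem.Chars.lstrip, haws]
      have hcne : PySem.Chars.strip (a :: t) ≠ [] := by
        simp only [PySem.Chars.strip, hlst, PySem.Chars.rstrip]
        intro hcon
        have : ∀ c ∈ (a :: t).reverse, PySem.Chars.isspace c = true := by
          rw [← List.dropWhile_eq_nil_iff]
          simpa using congrArg List.reverse hcon
        have := this a (by simp)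
        rw [haws] at this; exact Bool.false_ne_true this
      have hpos : (0 : Int) < ((a :: t).length : Int) := by
        simp only [List.length_cons]; positivity
      have htake : PySem.List.slice (PySem.Chars.strip buf) none (some (((a :: t).length : Nat) : Int))
          = a :: t := by
        rw [PySem.List.slice_to _ (by positivity), hsplit]
        simp only [Int.toNat_natCast]
        exact List.take_left
      have hdrop : PySem.List.slice (PySem.Chars.strip buf)
          (some ((((a :: t).length : Nat) : Int) + 1)) none = e := by
        have : ((((a :: t).length : Nat) : Int) + 1) = (((a :: t).length + 1 : Nat) : Int) := by
          push_cast; ring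
        rw [this, PySem.List.slice_from _ (by positivity), hsplit]
        simp only [Int.toNat_natCast]
        have h4 : (a :: t) ++ '=' :: e = ((a :: t) ++ ['=']) ++ e := by simp
        rw [h4, List.drop_left' (by simp)]
      have hstre : PySem.Chars.strip expr = PySem.Chars.strip e := by
        rw [hexpr]; exact strip_ws_suffix w2 hw2 _
      simp only [finB, heq, hstripc, partContrib, hfind, hcne, ne_eq, not_false_eq_true,
        and_true, if_pos hpos, htake, hdrop, hstre]
      simp

lemma splitCsvGo_acc (l : List Char) : ∀ (parts : List (List Char)) (buf : List Char) (d : Int),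
    splitCsvGo l parts buf d = parts ++ splitCsvGo l [] buf d := by
  induction l with
  | nil =>
    intro parts buf d
    by_cases h : (PySem.Chars.strip buf).isEmpty <;> simp [splitCsvGo, h]
  | cons ch rest ih =>
    intro parts buf d
    simp only [splitCsvGo]
    split_ifs
    all_goals
      first
        | (rw [ih (parts ++ [PySem.Chars.strip buf]), ih ([] ++ [PySem.Chars.strip buf])]; simp)
        | exact ih parts (buf ++ [ch]) _

lemma partsLoop_eq (ps : List (List Char)) : ∀ (out : List (String × String)),
    partsLoop ps out = out ++ ps.flatMap partContrib := by
  induction ps with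
  | nil => intro out; simp [partsLoop]
  | cons p rest ih =>
    intro out
    simp only [partsLoop, partContrib, List.flatMap_cons]
    split_ifs with h
    · rw [ih]; simp
    · rw [ih]; simp

lemma goB_eq (l : List Char) : ∀ (buf col expr : List Char) (eq : Bool) (d : Int)
    (out : List (String × String)),
    buf.foldl scanStep ([], [], false, 0) = (col, expr, eq, d) →
    goB l out col expr d eq = out ++ (splitCsvGo l [] buf d).flatMap partContrib := by
  induction l with
  | nil =>
    intro buf col expr eq d out h
    simp only [goB, splitCsvGo]
    rw [finB_eq buf col expr eq d h]
    by_cases he : (PySem.Chars.strip buf).isEmpty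
    · have : PySem.Chars.strip buf = [] := by simpa [List.isEmpty_iff] using he
      simp [this, partContrib, findEqGo]
    · simp [he]
  | cons ch rest ih =>
    intro buf col expr eq d out h
    simp only [goB, splitCsvGo]
    have hds : (if ch = '(' then d + 1 else if ch = ')' then max 0 (d - 1) else d) = depthStep d ch := rfl
    rw [hds]
    split_ifs with h1 h2 h3
    · -- top-level comma: finalize
      rw [ih [] [] [] false (depthStep d ch) _ (by
        obtain ⟨rfl, hd0⟩ := h1
        simp [hd0])]
      rw [splitCsvGo_acc rest ([] ++ [PySem.Chars.strip buf])]
      rw [finB_eq buf col expr eq d h]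
      simp
    · -- first top-level '='
      have hstep : (buf ++ [ch]).foldl scanStep ([], [], false, 0) = (col, expr, true, depthStep d ch) := by
        rw [List.foldl_append, h]
        obtain ⟨rfl, hd0, hef⟩ := h2
        simp [scanStep, hd0, hef]
      rw [ih (buf ++ [ch]) col expr true (depthStep d ch) out hstep]
    · -- expression grows
      have hstep : (buf ++ [ch]).foldl scanStep ([], [], false, 0) = (col, expr ++ [ch], eq, depthStep d ch) := by
        rw [List.foldl_append, h]
        simp [scanStep, h3]
      rw [ih (buf ++ [ch]) col (expr ++ [ch]) eq (depthStep d ch) out hstep]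
    · -- column grows
      have he : eq = false := by simpa using h3
      have h2' : ¬ (ch = '=' ∧ depthStep d ch = 0) := by
        intro hc; exact h2 ⟨hc.1, hc.2, he⟩
      have hstep : (buf ++ [ch]).foldl scanStep ([], [], false, 0) = (col ++ [ch], expr, eq, depthStep d ch) := by
        rw [List.foldl_append, h]
        simp [scanStep, he, h2']
      rw [ih (buf ++ [ch]) (col ++ [ch]) expr eq (depthStep d ch) out hstep]

-- ===== VERDICT (by name: the statement is the Claim_ definition above) =====
theorem split_set_list_py_spec : Claim_equal_split_set_list_py := by
  intro sets _
  unfold Spec_split_set_list_py split_set_list_py split_set_list_py_alt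
  rw [partsLoop_eq, goB_eq sets.toList [] [] [] false 0 [] rfl]
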